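-- pv_equiv track=rewrite | github.com/lzhang90/PSAA_analysis | verb_simple.py | verb_state_simple_subtask_strategy
-- ===== SOURCE A (Python) =====
-- import itertools
--
-- action_list=['click des','fill correct','fill incorrect','liberary related','liberary unrelated','click restart']
--
-- def verb_state_simple_subtask_strategy(verb_state_simple_subtask):     #将determine 改为有无策略
--     all_list=[]
--     for i in verb_state_simple_subtask:
--         sub_list=[]
--         d_list=[]
--         for k in range(len(i)):
--             if i[k] in action_list:
--                 if len(d_list)>0:
--                     sub_list.append(d_list)
--                     d_list = []
--                 sub_list.append(i[k])
--             else: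
--                 d_list.append(i[k])
--         strage_list=[]
--         for j in sub_list:
--             if j in action_list:    ###可能会报错
--                 strage_list.append(j)
--             elif j is not None:
--                 a = [len(list(v)) for k, v in itertools.groupby(j)]
--                 if sum(list(map(divide, a)))>=1:
--                     tmp1=["strategy_yes"] * sum(list(map(divide, a)))
--                     for x in tmp1:
--                         strage_list.append(x)
--                 elif sum(a)//3>0:
--                     tmp2=["strategy_no"] * (sum(a)//3)
--                     for y in tmp2:
--                         strage_list.append(y)
--                 else:
--                     strage_list.append("strategy_no" *1)
--             else:
--                 pass
--         all_list.append(strage_list)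
--     all_list = [i for i in all_list if i is not None]
--     all_list = [i for i in all_list if len(i) > 0]
--     return all_list
--
-- def divide(c):
--     return c // 3
-- ===== SOURCE B (Python) =====
-- action_list = ['click des', 'fill correct', 'fill incorrect', 'liberary related',
--                'liberary unrelated', 'click restart']
--
-- def verb_state_simple_subtask_strategy(verb_state_simple_subtask):
--     # Streaming with O(1) integer counters: no buffer of items, no run-length list,
--     # no groupby. 'run' = length of the current run of equal items, 'yes' = sum of
--     # floor(run/3) over completed runs, 'total' = items since the last action.
--     out = []
--     for seq in verb_state_simple_subtask:
--         res = []
--         prev, run, yes, total = None, 0, 0, 0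
--         for item in seq:
--             if item in action_list:
--                 yes += run // 3
--                 if total > 0:
--                     if yes >= 1:
--                         res += ["strategy_yes"] * yes
--                     elif total // 3 > 0:
--                         res += ["strategy_no"] * (total // 3)
--                     else:
--                         res.append("strategy_no")
--                 res.append(item)
--                 prev, run, yes, total = None, 0, 0, 0
--             elif item == prev:
--                 run += 1
--                 total += 1
--             else:
--                 yes += run // 3
--                 prev, run, total = item, 1, total + 1
--         # trailing non-action items are never emitted (no action closes them)
--         if res:
--             out.append(res)
--     return out
-- ===== Notes on version B (the rewrite author's own statement) =====
-- stated objective: alternative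
-- what changed: A materializes a per-sequence segmentation (sub_list of buffered item lists) and classifies each buffer in a second pass via itertools.groupby run-length lists; B is a single streaming pass keeping only three integer counters (current run length, accumulated yes-count, total since last action) and never builds buffers, sub_list or run-length lists.
import Mathlib
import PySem

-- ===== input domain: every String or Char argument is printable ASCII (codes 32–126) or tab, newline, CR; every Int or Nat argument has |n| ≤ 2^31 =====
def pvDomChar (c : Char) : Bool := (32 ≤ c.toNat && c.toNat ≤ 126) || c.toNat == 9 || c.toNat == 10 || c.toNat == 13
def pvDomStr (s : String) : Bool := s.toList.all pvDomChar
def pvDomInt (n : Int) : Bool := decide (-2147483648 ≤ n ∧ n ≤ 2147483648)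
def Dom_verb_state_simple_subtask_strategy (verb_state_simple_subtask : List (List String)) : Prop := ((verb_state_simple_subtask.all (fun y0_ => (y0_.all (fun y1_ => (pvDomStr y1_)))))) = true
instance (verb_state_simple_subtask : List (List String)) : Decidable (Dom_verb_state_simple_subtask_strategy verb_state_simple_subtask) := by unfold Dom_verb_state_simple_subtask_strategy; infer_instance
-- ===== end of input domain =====

-- A segments each sequence into buffered item lists and classifies each buffer with groupby
-- run lengths; B streams each sequence once keeping only integer counters (current run length,
-- yes-count, total) and never materializes buffers or run-length lists; objective: alternative.

-- ===== PORT A =====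

def actionList : List String :=
  ["click des", "fill correct", "fill incorrect", "liberary related",
   "liberary unrelated", "click restart"]

-- '[len(list(v)) for k, v in itertools.groupby(j)]' : run lengths of consecutive equal items
def runLengthsGo (cur : String) (cnt : Nat) : List String → List Nat
  | [] => [cnt]
  | x :: xs => if x == cur then runLengthsGo cur (cnt + 1) xs else cnt :: runLengthsGo x 1 xs

def runLengths : List String → List Nat
  | [] => []
  | x :: xs => runLengthsGo x 1 xs

-- A's classification of one buffered run list ('strategy_no' * 1 is the single string)
def classifyBuf (j : List String) : List String :=
  let a := runLengths j
  if (a.map (· / 3)).sum ≥ 1 then List.replicate ((a.map (· / 3)).sum) "strategy_yes"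
  else if a.sum / 3 > 0 then List.replicate (a.sum / 3) "strategy_no"
  else ["strategy_no"]

-- pass 1 of A: split one sequence into action strings (inl) and buffered runs (inr)
def aStep (st : List (String ⊕ List String) × List String) (x : String) :
    List (String ⊕ List String) × List String :=
  if x ∈ actionList then
    (if st.2.length > 0 then st.1 ++ [Sum.inr st.2, Sum.inl x] else st.1 ++ [Sum.inl x], [])
  else (st.1, st.2 ++ [x])

-- pass 2 of A over sub_list; an inl element is an action string (Python re-checks membership,
-- which holds by construction), an inr element is a buffer to classify; 'is None' never holds
def aPiece : String ⊕ List String → List String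
  | Sum.inl s => [s]
  | Sum.inr l => classifyBuf l

def aSeq (i : List String) : List String :=
  (i.foldl aStep ([], [])).1.foldl (fun acc j => acc ++ aPiece j) []

def verb_state_simple_subtask_strategy (verb_state_simple_subtask : List (List String)) : List (List String) :=
  let all_list := verb_state_simple_subtask.foldl (fun acc i => acc ++ [aSeq i]) []
  -- '[i for i in all_list if i is not None]' keeps everything; then keep the non-empty lists
  all_list.filter (fun i => i.length > 0)

-- ===== PORT B =====

-- B's state per sequence: (res, prev, run, yes, total); counters only, no buffers
def bStep (st : List String × Option String × Nat × Nat × Nat) (item : String) :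
    List String × Option String × Nat × Nat × Nat :=
  if item ∈ actionList then
    let yes' := st.2.2.2.1 + st.2.2.1 / 3
    let res' :=
      if st.2.2.2.2 > 0 then
        st.1 ++ (if yes' ≥ 1 then List.replicate yes' "strategy_yes"
                 else if st.2.2.2.2 / 3 > 0 then List.replicate (st.2.2.2.2 / 3) "strategy_no"
                 else ["strategy_no"]) ++ [item]
      else st.1 ++ [item]
    (res', none, 0, 0, 0)
  else if st.2.1 == some item then
    (st.1, st.2.1, st.2.2.1 + 1, st.2.2.2.1, st.2.2.2.2 + 1)
  else
    (st.1, some item, 1, st.2.2.2.1 + st.2.2.1 / 3, st.2.2.2.2 + 1)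

def bSeq (seq : List String) : List String :=
  (seq.foldl bStep ([], none, 0, 0, 0)).1

def verb_state_simple_subtask_strategy_alt (verb_state_simple_subtask : List (List String)) : List (List String) :=
  verb_state_simple_subtask.foldl
    (fun out seq =>
      let res := bSeq seq
      if res.length > 0 then out ++ [res] else out)
    []

-- ===== PRECONDITION & SPEC =====
def Spec_verb_state_simple_subtask_strategy (verb_state_simple_subtask : List (List String)) (out : List (List String)) : Prop := out = verb_state_simple_subtask_strategy_alt verb_state_simple_subtask
instance (verb_state_simple_subtask : List (List String)) (out : List (List String)) : Decidable (Spec_verb_state_simple_subtask_strategy verb_state_simple_subtask out) := by unfold Spec_verb_state_simple_subtask_strategy; infer_instance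

-- ===== CLAIM (what is proved, stated in full; the proofs are below) =====
def Claim_equal_verb_state_simple_subtask_strategy : Prop := ∀ (verb_state_simple_subtask : List (List String)), Dom_verb_state_simple_subtask_strategy verb_state_simple_subtask → Spec_verb_state_simple_subtask_strategy verb_state_simple_subtask (verb_state_simple_subtask_strategy verb_state_simple_subtask)

-- ===== LEMMAS AND PROOFS =====

-- the counters part of B's step on a non-action item
def cStep (c : Option String × Nat × Nat × Nat) (item : String) : Option String × Nat × Nat × Nat :=
  if c.1 == some item then (c.1, c.2.1 + 1, c.2.2.1, c.2.2.2 + 1)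
  else (some item, 1, c.2.2.1 + c.2.1 / 3, c.2.2.2 + 1)

def bCounters (d : List String) : Option String × Nat × Nat × Nat :=
  d.foldl cStep (none, 0, 0, 0)

-- counters vs run lengths, generalized over the in-progress run
theorem cgo (xs : List String) (cur : String) (cnt yes total : Nat) :
    (xs.foldl cStep (some cur, cnt, yes, total)).2.2.1 +
      (xs.foldl cStep (some cur, cnt, yes, total)).2.1 / 3
      = yes + ((runLengthsGo cur cnt xs).map (· / 3)).sum
  ∧ (xs.foldl cStep (some cur, cnt, yes, total)).2.2.2 = total + xs.length := by
  induction xs generalizing cur cnt yes total with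
  | nil => simp [runLengthsGo]
  | cons x xs ih =>
    simp only [List.foldl_cons, cStep, runLengthsGo]
    by_cases h : x = cur
    · subst h
      simp only [BEq.rfl, if_true, List.length_cons]
      obtain ⟨h1, h2⟩ := ih x (cnt + 1) yes (total + 1)
      exact ⟨h1, by omega⟩
    · have hb : (some cur == some x) = false := by
        rw [beq_eq_false_iff_ne]; exact fun e => h (Option.some.inj e).symm
      have hb2 : (x == cur) = false := by rw [beq_eq_false_iff_ne]; exact h
      simp only [hb, hb2, Bool.false_eq_true, if_false, List.map_cons, List.sum_cons,
        List.length_cons]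
      obtain ⟨h1, h2⟩ := ih x 1 (yes + cnt / 3) (total + 1)
      exact ⟨by omega, by omega⟩

theorem counters_spec (x : String) (xs : List String) :
    (bCounters (x :: xs)).2.2.1 + (bCounters (x :: xs)).2.1 / 3
        = ((runLengths (x :: xs)).map (· / 3)).sum
  ∧ (bCounters (x :: xs)).2.2.2 = (x :: xs).length := by
  have h0 : bCounters (x :: xs) = xs.foldl cStep (some x, 1, 0, 1) := by
    simp [bCounters, cStep]
  obtain ⟨h1, h2⟩ := cgo xs x 1 0 1
  rw [h0]
  refine ⟨by simpa [runLengths] using h1, ?_⟩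
  simp only [List.length_cons]
  omega

theorem sum_runLengthsGo (xs : List String) (cur : String) (cnt : Nat) :
    (runLengthsGo cur cnt xs).sum = cnt + xs.length := by
  induction xs generalizing cur cnt with
  | nil => simp [runLengthsGo]
  | cons x xs ih =>
    simp only [runLengthsGo, List.length_cons]
    by_cases h : x = cur
    · subst h
      simp only [BEq.rfl, if_true]
      rw [ih]; omega
    · have hb : (x == cur) = false := by rw [beq_eq_false_iff_ne]; exact h
      simp only [hb, Bool.false_eq_true, if_false, List.sum_cons]
      rw [ih]; omega

theorem sum_runLengths (d : List String) : (runLengths d).sum = d.length := by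
  cases d with
  | nil => simp [runLengths]
  | cons x xs => simp only [runLengths, sum_runLengthsGo, List.length_cons]; omega

-- A's classification with the run-length sum rewritten to the buffer length
theorem classifyBuf_eq (d : List String) :
    classifyBuf d =
      if ((runLengths d).map (· / 3)).sum ≥ 1 then
        List.replicate (((runLengths d).map (· / 3)).sum) "strategy_yes"
      else if d.length / 3 > 0 then List.replicate (d.length / 3) "strategy_no"
      else ["strategy_no"] := by
  unfold classifyBuf
  simp only [sum_runLengths]

-- value of A's pass 2 on a partial sub_list
def aOut (sub : List (String ⊕ List String)) : List String :=
  sub.foldl (fun acc j => acc ++ aPiece j) []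

theorem aOut_append (s t : List (String ⊕ List String)) :
    aOut (s ++ t) = aOut s ++ t.flatMap aPiece := by
  simp [aOut, List.flatMap_def]

-- main invariant: A's two passes from state (sub, d) equal B's single counter pass
-- from state (aOut sub, bCounters d)
theorem main_inv (xs : List String) (sub : List (String ⊕ List String)) (d : List String) :
    aOut ((xs.foldl aStep (sub, d)).1)
      = (xs.foldl bStep (aOut sub, bCounters d)).1 := by
  induction xs generalizing sub d with
  | nil => simp
  | cons x xs ih =>
    by_cases hx : x ∈ actionList
    · cases d with
      | nil =>
        have hA : aStep (sub, ([] : List String)) x = (sub ++ [Sum.inl x], []) := by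
          simp [aStep, hx]
        have hB : bStep (aOut sub, bCounters []) x = (aOut sub ++ [x], none, 0, 0, 0) := by
          simp [bStep, hx, bCounters]
        rw [List.foldl_cons, hA, List.foldl_cons, hB, ih (sub ++ [Sum.inl x]) []]
        simp [aOut_append, aPiece, bCounters]
      | cons y ys =>
        have hc := counters_spec y ys
        have hlen : (bCounters (y :: ys)).2.2.2 = ys.length + 1 := by
          simpa using hc.2
        have hA : aStep (sub, y :: ys) x = (sub ++ [Sum.inr (y :: ys), Sum.inl x], []) := by
          simp [aStep, hx]
        have hB : bStep (aOut sub, bCounters (y :: ys)) x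
            = (aOut sub ++ classifyBuf (y :: ys) ++ [x], none, 0, 0, 0) := by
          simp only [bStep, hx, if_true, hlen, hc.1, classifyBuf_eq, List.length_cons]
          simp
        rw [List.foldl_cons, hA, List.foldl_cons, hB,
          ih (sub ++ [Sum.inr (y :: ys), Sum.inl x]) []]
        simp [aOut_append, aPiece, bCounters]
    · have hA : aStep (sub, d) x = (sub, d ++ [x]) := by simp [aStep, hx]
      have hB : bStep (aOut sub, bCounters d) x = (aOut sub, bCounters (d ++ [x])) := by
        simp only [bStep, hx, if_false, bCounters, List.foldl_append, List.foldl_cons,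
          List.foldl_nil]
        by_cases hp : (d.foldl cStep (none, 0, 0, 0)).1 == some x
        · simp [cStep, hp]
        · simp [cStep, hp]
      rw [List.foldl_cons, hA, List.foldl_cons, hB]
      exact ih sub (d ++ [x])

theorem aSeq_eq_bSeq (i : List String) : aSeq i = bSeq i := by
  have h := main_inv i [] []
  simpa [aSeq, bSeq, aOut, bCounters] using h

-- ===== VERDICT (by name: the statement is the Claim_ definition above) =====
theorem verb_state_simple_subtask_strategy_spec : Claim_equal_verb_state_simple_subtask_strategy := by
  intro l _
  unfold Spec_verb_state_simple_subtask_strategy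
  unfold verb_state_simple_subtask_strategy verb_state_simple_subtask_strategy_alt
  simp only [PySem.List.foldl_append_singleton_eq_map, List.nil_append]
  rw [funext aSeq_eq_bSeq,
    PySem.List.foldl_append_ite (p := fun s => (bSeq s).length > 0) (f := bSeq)]
  simp [List.filter_map, Function.comp_def]
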